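-- pv_equiv track=rewrite | github.com/robo919/ML_BASED_PH | src/feature_extractor.py | _max_consecutive_chars
-- ===== SOURCE A (Python) =====
-- def _max_consecutive_chars(text: str, char_set: str) -> int:
--     """Find maximum consecutive characters from a character set"""
--     max_count = 0
--     current_count = 0
--
--     for char in text.lower():
--         if char in char_set:
--             current_count += 1
--             max_count = max(max_count, current_count)
--         else:
--             current_count = 0
--
--     return max_count
-- ===== SOURCE B (Python) =====
-- def _runs(s, mem):
--     """Split s into maximal runs of consecutive characters with equal membership key."""
--     runs = []
--     while s:
--         k = mem(s[0])
--         i = 1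
--         while i < len(s) and mem(s[i]) == k:
--             i += 1
--         runs.append((k, s[:i]))
--         s = s[i:]
--     return runs
--
--
-- def _max_consecutive_chars(text: str, char_set: str) -> int:
--     """Find maximum consecutive characters from a character set"""
--     runs = _runs(text.lower(), lambda c: c in char_set)
--     return max((len(r) for k, r in runs if k), default=0)
-- ===== Notes on version B (the rewrite author's own statement) =====
-- stated objective: alternative
-- what changed: Replaces the running-counter/max single pass by a partition-into-maximal-runs decomposition: the lowered text is split into maximal runs of equal membership and the result is the max length of a member-run (default 0).
import Mathlib
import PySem

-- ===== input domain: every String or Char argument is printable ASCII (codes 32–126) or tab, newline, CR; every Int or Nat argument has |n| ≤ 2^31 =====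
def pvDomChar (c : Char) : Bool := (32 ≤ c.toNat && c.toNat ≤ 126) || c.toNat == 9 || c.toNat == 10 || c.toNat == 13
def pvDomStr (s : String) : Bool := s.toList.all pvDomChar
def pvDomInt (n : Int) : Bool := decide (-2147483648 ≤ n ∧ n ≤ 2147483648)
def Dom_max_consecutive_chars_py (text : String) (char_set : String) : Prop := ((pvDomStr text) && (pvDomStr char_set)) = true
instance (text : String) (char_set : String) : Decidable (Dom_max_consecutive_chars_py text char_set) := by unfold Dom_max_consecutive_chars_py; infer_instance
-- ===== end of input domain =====

-- B replaces A's running-counter pass by a partition-into-maximal-runs decomposition (alternative; return value only).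

-- ===== PORT A =====
-- literal port of A's single pass: state (max_count, current_count), 'char in char_set' is char membership
def max_consecutive_chars_py (text : String) (char_set : String) : Int :=
  (((PySem.Str.lower text).toList.foldl
    (fun (st : Int × Int) c =>
      if char_set.toList.contains c then (max st.1 (st.2 + 1), st.2 + 1) else (st.1, 0))
    (0, 0))).1

-- ===== PORT B =====
-- port of Source B's _runs: maximal runs of consecutive characters with equal membership key
def pvRuns (mem : Char → Bool) : List Char → List (Bool × List Char)
  | [] => []
  | c :: rest =>
    (mem c, c :: rest.takeWhile (fun x => mem x == mem c)) ::
      pvRuns mem (rest.dropWhile (fun x => mem x == mem c))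
termination_by l => l.length
decreasing_by
  have := List.length_dropWhile_le (fun x => mem x == mem c) rest
  simp; omega

def max_consecutive_chars_py_alt (text : String) (char_set : String) : Int :=
  let runs := pvRuns (fun c => char_set.toList.contains c) (PySem.Str.lower text).toList
  PySem.List.maxD ((runs.filter (fun g => g.1)).map (fun g => (g.2.length : Int))) id 0

-- ===== PRECONDITION & SPEC =====
def Spec_max_consecutive_chars_py (text : String) (char_set : String) (out : Int) : Prop := out = max_consecutive_chars_py_alt text char_set
instance (text : String) (char_set : String) (out : Int) : Decidable (Spec_max_consecutive_chars_py text char_set out) := by unfold Spec_max_consecutive_chars_py; infer_instance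

-- ===== CLAIM (what is proved, stated in full; the proofs are below) =====
def Claim_equal_max_consecutive_chars_py : Prop := ∀ (text : String) (char_set : String), Dom_max_consecutive_chars_py text char_set → Spec_max_consecutive_chars_py text char_set (max_consecutive_chars_py text char_set)

-- ===== LEMMAS AND PROOFS =====

-- proof-side characterization: pvG mem cc l = max "current count" reached over the rest of the pass
def pvG (mem : Char → Bool) (cc : Int) : List Char → Int
  | [] => 0
  | c :: rest => if mem c then max (cc + 1) (pvG mem (cc + 1) rest) else pvG mem 0 rest

lemma pvG_nonneg (mem : Char → Bool) (l : List Char) (cc : Int) : 0 ≤ pvG mem cc l := by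
  induction l generalizing cc with
  | nil => simp [pvG]
  | cons c rest ih =>
    simp only [pvG]
    split_ifs
    · exact le_trans (ih _) (le_max_right _ _)
    · exact ih _

-- A's fold equals max of the accumulator and pvG
lemma pvA_loop (mem : Char → Bool) (l : List Char) (mc cc : Int) (hmc : 0 ≤ mc) :
    (l.foldl (fun (st : Int × Int) c =>
      if mem c then (max st.1 (st.2 + 1), st.2 + 1) else (st.1, 0)) (mc, cc)).1
    = max mc (pvG mem cc l) := by
  induction l generalizing mc cc with
  | nil => simp [pvG, max_eq_left hmc]
  | cons c rest ih =>
    simp only [List.foldl, pvG]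
    split_ifs with h
    · rw [ih _ _ (le_trans hmc (le_max_left _ _)), max_assoc]
    · exact ih _ _ hmc

-- pvG across a member-run followed by a non-member (or empty) tail
lemma pvG_run (mem : Char → Bool) (t d : List Char) (cc : Int) (hcc : 0 ≤ cc)
    (ht : ∀ c ∈ t, mem c = true) (hd : ∀ c, d.head? = some c → mem c = false) :
    pvG mem cc (t ++ d) =
      if t.isEmpty then pvG mem 0 d else max (cc + (t.length : Int)) (pvG mem 0 d) := by
  induction t generalizing cc with
  | nil =>
    simp only [List.isEmpty_nil, List.nil_append, if_pos]
    cases d with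
    | nil => simp [pvG]
    | cons x r => simp [pvG, hd x rfl]
  | cons a t' ih =>
    have ha : mem a = true := ht a (List.mem_cons_self)
    have ht' : ∀ c ∈ t', mem c = true := fun c hc => ht c (List.mem_cons_of_mem _ hc)
    simp only [List.cons_append, pvG, ha, if_pos]
    rw [ih (cc + 1) (by omega) ht']
    cases t' with
    | nil => simp
    | cons b t'' =>
      rw [if_neg (by simp), if_neg (by simp)]
      rw [← max_assoc]
      congr 1
      simp only [List.length_cons]
      rw [max_eq_right (by push_cast; omega)]
      push_cast; ring

-- pvG (from a fresh counter) skips leading non-members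
lemma pvG_skip (mem : Char → Bool) (t r : List Char) (ht : ∀ c ∈ t, mem c = false) :
    pvG mem 0 (t ++ r) = pvG mem 0 r := by
  induction t with
  | nil => rfl
  | cons a t' ih =>
    simp only [List.cons_append, pvG, ht a List.mem_cons_self, Bool.false_eq_true, if_false]
    exact ih (fun c hc => ht c (List.mem_cons_of_mem _ hc))

-- Python max(xs, default=0): max? over a cons is a plain foldl max
lemma pvMaxFold (xs : List Int) (m : Int) :
    PySem.List.max? (m :: xs) id = some (xs.foldl max m) := by
  induction xs generalizing m with
  | nil => rfl
  | cons x xs ih =>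
    have e1 : PySem.List.max? (m :: x :: xs) id =
        if id m < id x then PySem.List.max? (x :: xs) id else PySem.List.max? (m :: xs) id := by
      by_cases h : id m < id x
      · show List.foldl _ (if id m < id x then some x else some m) xs = _
        rw [if_pos h, if_pos h]
        rfl
      · show List.foldl _ (if id m < id x then some x else some m) xs = _
        rw [if_neg h, if_neg h]
        rfl
    by_cases h : id m < id x
    · rw [e1, if_pos h, ih]
      have h2 : m ≤ x := le_of_lt h
      simp only [List.foldl]
      rw [max_eq_right h2]
    · rw [e1, if_neg h, ih]
      have h2 : x ≤ m := not_lt.mp h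
      simp only [List.foldl]
      rw [max_eq_left h2]

lemma pvMaxD_foldl (x : Int) (xs : List Int) :
    PySem.List.maxD (x :: xs) id 0 = xs.foldl max x := by
  simp only [PySem.List.maxD, pvMaxFold, Option.getD_some]

lemma pvFoldMax (xs : List Int) (a b : Int) : xs.foldl max (max a b) = max a (xs.foldl max b) := by
  induction xs generalizing b with
  | nil => rfl
  | cons x xs ih => simp only [List.foldl, max_assoc]; exact ih _

lemma pvMaxD_cons (x : Int) (xs : List Int) (hx : 0 ≤ x) :
    PySem.List.maxD (x :: xs) id 0 = max x (PySem.List.maxD xs id 0) := by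
  rw [pvMaxD_foldl]
  cases xs with
  | nil => simp [PySem.List.maxD, PySem.List.max?, List.foldl, max_eq_left hx]
  | cons y ys =>
    rw [pvMaxD_foldl]
    exact pvFoldMax ys x y

-- abbreviation for B's reduction over the run list
def pvM (rs : List (Bool × List Char)) : Int :=
  PySem.List.maxD ((rs.filter (fun g => g.1)).map (fun g => (g.2.length : Int))) id 0

lemma pvM_nil : pvM [] = 0 := by
  simp [pvM, PySem.List.maxD, PySem.List.max?]

lemma pvM_cons_true (t : List Char) (rs : List (Bool × List Char)) :
    pvM ((true, t) :: rs) = max (t.length : Int) (pvM rs) := by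
  unfold pvM
  rw [List.filter_cons_of_pos (by rfl), List.map_cons]
  exact pvMaxD_cons _ _ (by positivity)

lemma pvM_cons_false (t : List Char) (rs : List (Bool × List Char)) :
    pvM ((false, t) :: rs) = pvM rs := by
  unfold pvM
  rw [List.filter_cons_of_neg (by simp)]

lemma pvM_cons (k : Bool) (t : List Char) (rs : List (Bool × List Char)) :
    pvM ((k, t) :: rs) = if k = true then max (t.length : Int) (pvM rs) else pvM rs := by
  cases k
  · rw [if_neg (by simp)]; exact pvM_cons_false t rs
  · rw [if_pos rfl]; exact pvM_cons_true t rs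

lemma pvMain (mem : Char → Bool) : ∀ (n : Nat) (l : List Char), l.length ≤ n →
    pvG mem 0 l = pvM (pvRuns mem l) := by
  intro n
  induction n with
  | zero =>
    intro l hl
    have h0 : l = [] := List.eq_nil_of_length_eq_zero (Nat.le_zero.mp hl)
    subst h0
    rw [pvRuns, pvM_nil]
    rfl
  | succ n ih =>
    intro l hl
    cases l with
    | nil => rw [pvRuns, pvM_nil]; rfl
    | cons c rest =>
      have hsplit := List.takeWhile_append_dropWhile (p := fun x => mem x == mem c) (l := rest)
      have hdroplen := List.length_dropWhile_le (fun x => mem x == mem c) rest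
      have hlen : (rest.dropWhile (fun x => mem x == mem c)).length ≤ n := by
        simp only [List.length_cons] at hl; omega
      by_cases h : mem c = true
      · -- key = true: first run is a member run
        rw [pvRuns, pvM_cons, if_pos h, ← ih _ hlen]
        have hG : pvG mem 0 (c :: rest) =
            max (0 + ((c :: rest.takeWhile (fun x => mem x == mem c)).length : Int))
              (pvG mem 0 (rest.dropWhile (fun x => mem x == mem c))) := by
          conv_lhs => rw [show c :: rest =
            (c :: rest.takeWhile (fun x => mem x == mem c)) ++
              rest.dropWhile (fun x => mem x == mem c) by simp [hsplit]]
          rw [pvG_run mem _ _ 0 le_rfl]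
          · simp
          · intro x hx
            rcases List.mem_cons.mp hx with rfl | hx
            · exact h
            · have hmx := List.mem_takeWhile_imp hx
              simpa [h] using hmx
          · intro x hx
            have hhd := List.head?_dropWhile_not (fun x => mem x == mem c) rest
            rw [hx] at hhd
            simpa [h] using hhd
        rw [hG]
        norm_num
      · -- key = false: first run is dropped by the filter
        have h' : mem c = false := by simpa using h
        rw [pvRuns, pvM_cons, if_neg h, ← ih _ hlen]
        have hG : pvG mem 0 (c :: rest) =
            pvG mem 0 (rest.dropWhile (fun x => mem x == mem c)) := by
          have h1 : pvG mem 0 (c :: rest) = pvG mem 0 rest := by simp [pvG, h']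
          rw [h1]
          conv_lhs => rw [← hsplit]
          exact pvG_skip mem _ _ (fun x hx => by simpa [h'] using List.mem_takeWhile_imp hx)
        rw [hG]

-- ===== VERDICT (by name: the statement is the Claim_ definition above) =====
theorem max_consecutive_chars_py_spec : Claim_equal_max_consecutive_chars_py := by
  intro text char_set _
  unfold Spec_max_consecutive_chars_py max_consecutive_chars_py max_consecutive_chars_py_alt
  rw [pvA_loop _ _ 0 0 le_rfl, max_eq_right (pvG_nonneg _ _ 0)]
  rw [pvMain _ (PySem.Str.lower text).toList.length _ le_rfl]
  rfl
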